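-- pv_equiv track=rewrite | github.com/kensho-technologies/kenverters | kensho_kenverters/tables_utils.py | _split_row_ids_after_column_headers
-- ===== SOURCE A (Python) =====
-- def _split_row_ids_after_column_headers(
--     max_column_header_row_id: int,
--     n_row: int,
--     project_row_header_row_ids: set[int],
-- ) -> list[list[int]]:
--     """To split row ids (after column headers) of long table into sub-lists of row ids based on the project row headers.
--
--     We split the row ids (after the column headers) of long table based on the position of project row headers. The output
--     of this function will be a list of sub-lists of row ids for subtables.
--     """  # noqa: E501
--
--     initial_row_id = max_column_header_row_id + 1
--
--     # Initial the empty list of subtable row ids.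
--     subtable_row_ids_list = []
--
--     # Split the row ids (after column headers) into a list of sublist of row ids of subtables.
--     row_id_cursor = initial_row_id
--     non_project_row_header_row_id_list: list[int] = []
--     for row_idx in range(initial_row_id, n_row):
--         if row_idx == n_row - 1:
--             subtable_row_ids_list.append(list(range(row_id_cursor, row_idx + 1)))
--         elif row_idx in project_row_header_row_ids:
--             if len(non_project_row_header_row_id_list) > 0:
--                 subtable_row_ids_list.append(list(range(row_id_cursor, row_idx)))
--                 row_id_cursor = row_idx
--                 non_project_row_header_row_id_list = []
--         else:
--             non_project_row_header_row_id_list.append(row_idx)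
--     return subtable_row_ids_list
-- ===== SOURCE B (Python) =====
-- def _split_row_ids_after_column_headers(
--     max_column_header_row_id: int,
--     n_row: int,
--     project_row_header_row_ids: set[int],
-- ) -> list[list[int]]:
--     """Closed-form version: a header row h starts a new subtable exactly when
--     the preceding row h-1 is not a header (so h is preceded by content), and
--     the first and last rows never start one.  Cut points are computed by a
--     stateless filter, then the rows are sliced between consecutive cuts."""
--     initial_row_id = max_column_header_row_id + 1
--     if initial_row_id >= n_row:
--         return []
--     cuts = (
--         [initial_row_id]
--         + [
--             h
--             for h in range(initial_row_id + 1, n_row - 1)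
--             if h in project_row_header_row_ids
--             and h - 1 not in project_row_header_row_ids
--         ]
--         + [n_row]
--     )
--     return [list(range(a, b)) for a, b in zip(cuts, cuts[1:])]
-- ===== Notes on version B (the rewrite author's own statement) =====
-- stated objective: alternative
-- what changed: A's stateful single pass (cursor + accumulated content-row list, emitting ranges inline) is replaced by a stateless closed-form characterisation: a row starts a new subtable iff it is a header whose predecessor is not a header (first and last rows excluded); cut points come from a plain filter and the result is the slices between consecutive cuts.
import Mathlib
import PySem

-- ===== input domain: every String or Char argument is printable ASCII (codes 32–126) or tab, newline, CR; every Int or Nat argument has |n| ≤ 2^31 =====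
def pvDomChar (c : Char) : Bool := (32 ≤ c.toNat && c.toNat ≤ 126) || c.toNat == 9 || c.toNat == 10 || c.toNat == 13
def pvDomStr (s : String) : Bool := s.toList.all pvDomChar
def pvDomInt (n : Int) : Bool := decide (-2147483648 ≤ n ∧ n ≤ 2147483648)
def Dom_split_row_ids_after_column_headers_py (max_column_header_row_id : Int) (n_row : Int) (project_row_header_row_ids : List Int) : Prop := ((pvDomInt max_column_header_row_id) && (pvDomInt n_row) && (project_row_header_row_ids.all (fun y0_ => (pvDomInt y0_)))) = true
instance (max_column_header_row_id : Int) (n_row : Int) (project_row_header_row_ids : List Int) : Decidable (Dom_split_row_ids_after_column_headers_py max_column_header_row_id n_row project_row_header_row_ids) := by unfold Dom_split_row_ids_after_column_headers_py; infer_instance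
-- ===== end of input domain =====

-- B replaces A's stateful scan by a closed-form rule: a header row whose predecessor is
-- not a header starts a new subtable (objective: alternative, stateless decomposition).

-- ===== PORT A =====
-- loop body of A: state = (subtable_row_ids_list, row_id_cursor, non_project_row_header_row_id_list)
def pvAStep (n_row : Int) (hdrs : List Int) (st : List (List Int) × Int × List Int) (row_idx : Int) :
    List (List Int) × Int × List Int :=
  if row_idx = n_row - 1 then
    (st.1 ++ [PySem.List.pyRange st.2.1 (row_idx + 1) 1], st.2.1, st.2.2)
  else if hdrs.contains row_idx then
    (if st.2.2.length > 0 then (st.1 ++ [PySem.List.pyRange st.2.1 row_idx 1], row_idx, []) else st)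
  else
    (st.1, st.2.1, st.2.2 ++ [row_idx])

def split_row_ids_after_column_headers_py (max_column_header_row_id : Int) (n_row : Int) (project_row_header_row_ids : List Int) : List (List Int) :=
  let initial_row_id := max_column_header_row_id + 1
  let st := (PySem.List.pyRange initial_row_id n_row 1).foldl
      (pvAStep n_row project_row_header_row_ids) ([], initial_row_id, [])
  st.1

-- ===== PORT B =====
-- the filter predicate of B's list comprehension
def pvCutP (hdrs : List Int) (h : Int) : Bool :=
  hdrs.contains h && !hdrs.contains (h - 1)

def split_row_ids_after_column_headers_py_alt (max_column_header_row_id : Int) (n_row : Int) (project_row_header_row_ids : List Int) : List (List Int) :=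
  let initial_row_id := max_column_header_row_id + 1
  if initial_row_id ≥ n_row then []
  else
    let cuts := initial_row_id ::
      ((PySem.List.pyRange (initial_row_id + 1) (n_row - 1) 1).filter
        (pvCutP project_row_header_row_ids)) ++ [n_row]
    (cuts.zip (cuts.drop 1)).map (fun p => PySem.List.pyRange p.1 p.2 1)

-- ===== PRECONDITION & SPEC =====
def Spec_split_row_ids_after_column_headers_py (max_column_header_row_id : Int) (n_row : Int) (project_row_header_row_ids : List Int) (out : List (List Int)) : Prop := out = split_row_ids_after_column_headers_py_alt max_column_header_row_id n_row project_row_header_row_ids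
instance (max_column_header_row_id : Int) (n_row : Int) (project_row_header_row_ids : List Int) (out : List (List Int)) : Decidable (Spec_split_row_ids_after_column_headers_py max_column_header_row_id n_row project_row_header_row_ids out) := by unfold Spec_split_row_ids_after_column_headers_py; infer_instance

-- ===== CLAIM (what is proved, stated in full; the proofs are below) =====
def Claim_equal_split_row_ids_after_column_headers_py : Prop := ∀ (max_column_header_row_id : Int) (n_row : Int) (project_row_header_row_ids : List Int), Dom_split_row_ids_after_column_headers_py max_column_header_row_id n_row project_row_header_row_ids → Spec_split_row_ids_after_column_headers_py max_column_header_row_id n_row project_row_header_row_ids (split_row_ids_after_column_headers_py max_column_header_row_id n_row project_row_header_row_ids)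

-- ===== LEMMAS AND PROOFS =====

-- proof-side intermediate: the stateful "start collector" (starts, seen_content)
def pvBStep (hdrs : List Int) (st : List Int × Bool) (i : Int) : List Int × Bool :=
  if hdrs.contains i then
    (if st.2 then (st.1 ++ [i], false) else st)
  else
    (st.1, true)

-- the ranges between consecutive cut points
def pvPairs (starts : List Int) : List (List Int) :=
  (starts.zip (starts.drop 1)).map (fun p => PySem.List.pyRange p.1 p.2 1)

theorem pvPairs_append (s : List Int) (x : Int) (hs : s ≠ []) :
    pvPairs (s ++ [x]) = pvPairs s ++ [PySem.List.pyRange (s.getLastD 0) x 1] := by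
  induction s with
  | nil => simp at hs
  | cons a t ih =>
    cases t with
    | nil => simp [pvPairs]
    | cons b u =>
      have := ih (by simp)
      simp only [pvPairs, List.cons_append, List.drop_succ_cons, List.drop_zero,
        List.zip_cons_cons, List.map_cons, List.getLastD_cons] at *
      simp [this]

-- invariant relating A's loop state to the start collector over a prefix that
-- excludes the last row index
theorem pvInv (l : List Int) (n : Int) (hdrs : List Int)
    (acc : List (List Int)) (cursor : Int) (nph : List Int) (starts : List Int) (seen : Bool)
    (hl : ∀ x ∈ l, x ≠ n - 1)
    (hst : starts ≠ [])
    (hacc : acc = pvPairs starts)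
    (hcur : cursor = starts.getLastD 0)
    (hseen : seen = !nph.isEmpty) :
    (l.foldl (pvBStep hdrs) (starts, seen)).1 ≠ [] ∧
    (l.foldl (pvAStep n hdrs) (acc, cursor, nph)).1 =
      pvPairs (l.foldl (pvBStep hdrs) (starts, seen)).1 ∧
    (l.foldl (pvAStep n hdrs) (acc, cursor, nph)).2.1 =
      (l.foldl (pvBStep hdrs) (starts, seen)).1.getLastD 0 := by
  induction l generalizing acc cursor nph starts seen with
  | nil => exact ⟨hst, hacc, hcur⟩
  | cons x t ih =>
    have hx : x ≠ n - 1 := hl x (by simp)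
    have hl' : ∀ y ∈ t, y ≠ n - 1 := fun y hy => hl y (by simp [hy])
    simp only [List.foldl_cons]
    by_cases hmem : x ∈ hdrs
    · by_cases hne : nph = []
      · have hseen' : seen = false := by simp [hseen, hne]
        have hA : pvAStep n hdrs (acc, cursor, nph) x = (acc, cursor, nph) := by
          simp [pvAStep, hx, hmem, hne]
        have hB : pvBStep hdrs (starts, seen) x = (starts, seen) := by
          simp [pvBStep, hmem, hseen']
        rw [hA, hB]
        exact ih acc cursor nph starts seen hl' hst hacc hcur hseen
      · have hlen : nph.length > 0 := by
          cases nph with | nil => exact absurd rfl hne | cons _ _ => simp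
        have hseen' : seen = true := by simp [hseen, hne]
        have hA : pvAStep n hdrs (acc, cursor, nph) x
            = (acc ++ [PySem.List.pyRange cursor x 1], x, []) := by
          simp [pvAStep, hx, hmem, hlen]
        have hB : pvBStep hdrs (starts, seen) x = (starts ++ [x], false) := by
          simp [pvBStep, hmem, hseen']
        rw [hA, hB]
        refine ih _ _ _ _ _ hl' (by simp) ?_ ?_ (by simp)
        · rw [hacc, hcur, pvPairs_append starts x hst]
        · simp
    · have hA : pvAStep n hdrs (acc, cursor, nph) x = (acc, cursor, nph ++ [x]) := by
        simp [pvAStep, hx, hmem]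
      have hB : pvBStep hdrs (starts, seen) x = (starts, true) := by
        simp [pvBStep, hmem]
      rw [hA, hB]
      exact ih _ _ _ _ _ hl' hst hacc hcur (by simp)

-- the start collector over range a..k computes exactly B's stateless filter,
-- and its flag records whether the last processed row was a non-header
theorem pvCollector_eq_filter (hdrs : List Int) (a : Int) :
    ∀ k, a ≤ k →
    (PySem.List.pyRange a k 1).foldl (pvBStep hdrs) ([a], false)
      = (a :: (PySem.List.pyRange (a + 1) k 1).filter (pvCutP hdrs),
         decide (a < k) && !hdrs.contains (k - 1)) := by
  intro k hk
  induction k, hk using Int.le_induction with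
  | base =>
    simp [PySem.List.pyRange_one_eq_nil (le_refl a), PySem.List.pyRange_one_eq_nil (by omega : a + 1 ≥ a)]
  | succ k hk ih =>
    rw [show PySem.List.pyRange a (k + 1) 1 = PySem.List.pyRange a k 1 ++ [k] from
          PySem.List.pyRange_one_succ_right hk,
        List.foldl_append, ih]
    have hfil : (PySem.List.pyRange (a + 1) (k + 1) 1).filter (pvCutP hdrs)
        = (PySem.List.pyRange (a + 1) k 1).filter (pvCutP hdrs)
          ++ if a + 1 ≤ k ∧ pvCutP hdrs k = true then [k] else [] := by
      by_cases hak : a + 1 ≤ k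
      · rw [show PySem.List.pyRange (a + 1) (k + 1) 1 = PySem.List.pyRange (a + 1) k 1 ++ [k] from
            PySem.List.pyRange_one_succ_right hak, List.filter_append]
        by_cases hp : pvCutP hdrs k = true <;> simp [hp, hak]
      · have hka : k = a := by omega
        subst hka
        simp [PySem.List.pyRange_one_eq_nil (le_refl (k+1)),
              PySem.List.pyRange_one_eq_nil (le_refl k), hak]
    rw [hfil]
    simp only [List.foldl_cons, List.foldl_nil, pvBStep]
    by_cases hmem : k ∈ hdrs
    · by_cases hprev : (k - 1) ∈ hdrs
      · simp [hmem, hprev, pvCutP, show a < k + 1 by omega]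
      · by_cases hak : a < k
        · simp [hmem, hprev, pvCutP, hak, show a + 1 ≤ k by omega,
                show a < k + 1 by omega]
        · have hka : k = a := by omega
          subst hka
          simp [hmem, hprev, hak, show ¬ (k + 1 ≤ k) by omega,
                show k < k + 1 by omega]
    · simp [hmem, pvCutP, show a < k + 1 by omega]

-- ===== VERDICT (by name: the statement is the Claim_ definition above) =====
theorem split_row_ids_after_column_headers_py_spec : Claim_equal_split_row_ids_after_column_headers_py := by
  intro m n hdrs _
  unfold Spec_split_row_ids_after_column_headers_py
  unfold split_row_ids_after_column_headers_py split_row_ids_after_column_headers_py_alt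
  set a := m + 1 with ha
  by_cases h : a ≥ n
  · simp [PySem.List.pyRange_one_eq_nil h, h]
  · have h : a < n := lt_of_not_ge h
    simp only [not_le.mpr h, ge_iff_le, if_neg (not_le.mpr h)]
    have hsplit : PySem.List.pyRange a n 1
        = PySem.List.pyRange a (n - 1) 1 ++ [n - 1] := by
      rw [show PySem.List.pyRange a n 1 = PySem.List.pyRange a ((n - 1) + 1) 1 from by norm_num]
      exact PySem.List.pyRange_one_succ_right (by omega)
    rw [hsplit, List.foldl_append]
    have hl : ∀ x ∈ PySem.List.pyRange a (n - 1) 1, x ≠ n - 1 := by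
      intro x hx
      have := (PySem.List.mem_pyRange_one).1 hx
      omega
    obtain ⟨hne, h1, h2⟩ := pvInv (PySem.List.pyRange a (n - 1) 1) n hdrs
      [] a [] [a] false hl (by simp) (by simp [pvPairs]) (by simp) (by simp)
    have hcoll := pvCollector_eq_filter hdrs a (n - 1) (by omega)
    set F := (PySem.List.pyRange (a + 1) (n - 1) 1).filter (pvCutP hdrs) with hF
    set rb := (PySem.List.pyRange a (n - 1) 1).foldl (pvBStep hdrs) ([a], false)
    have hrb1 : rb.1 = a :: F := by rw [show rb = _ from hcoll]
    set ra := (PySem.List.pyRange a (n - 1) 1).foldl (pvAStep n hdrs) ([], a, [])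
    simp only [List.foldl_cons, List.foldl_nil, pvAStep, if_pos rfl]
    show ra.1 ++ [PySem.List.pyRange ra.2.1 (n - 1 + 1) 1]
        = ((a :: F ++ [n]).zip ((a :: F ++ [n]).drop 1)).map
            (fun p => PySem.List.pyRange p.1 p.2 1)
    have hn : n - 1 + 1 = n := by ring
    rw [hn, h1, h2, hrb1]
    have := pvPairs_append (a :: F) n (by simp)
    simpa [pvPairs] using this.symm
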